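-- pv_equiv track=rewrite | github.com/Mehangits/College_Projects | Quin_McCluskey_With_Name.py.py | group_list
-- ===== SOURCE A (Python) =====
-- def count_one(string):
--     count = 0
--     for n in string:
--         if n == '1':
--             count = count + 1
--     return count
--
-- def group_list(order_lists, var):
--     ones = var + 1
--     final_list = []
--     for n in range(ones):
--         final_list.append([])
--
--     # group like one's in each mini list
--     for n in range(ones):
--         for m in order_lists:
--             if count_one(m) == n:
--                 final_list[n].append(m)
--     final_list = [n for n in final_list if n != []]
--     return final_list
-- ===== SOURCE B (Python) =====
-- def group_list(order_lists, var):
--     buckets = {}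
--     for m in order_lists:
--         c = sum(1 for ch in m if ch == '1')
--         if c <= var:
--             buckets.setdefault(c, []).append(m)
--     return [buckets[c] for c in sorted(buckets)]
-- ===== Notes on version B (the rewrite author's own statement) =====
-- stated objective: faster
-- what changed: A preallocates var+1 buckets and rescans the whole input once per candidate count (nested range x list loops), then drops empty buckets; B makes a single dict-grouping pass over the input and emits the buckets in ascending order of the occurring one-counts via one sort of the keys.
import Mathlib
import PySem

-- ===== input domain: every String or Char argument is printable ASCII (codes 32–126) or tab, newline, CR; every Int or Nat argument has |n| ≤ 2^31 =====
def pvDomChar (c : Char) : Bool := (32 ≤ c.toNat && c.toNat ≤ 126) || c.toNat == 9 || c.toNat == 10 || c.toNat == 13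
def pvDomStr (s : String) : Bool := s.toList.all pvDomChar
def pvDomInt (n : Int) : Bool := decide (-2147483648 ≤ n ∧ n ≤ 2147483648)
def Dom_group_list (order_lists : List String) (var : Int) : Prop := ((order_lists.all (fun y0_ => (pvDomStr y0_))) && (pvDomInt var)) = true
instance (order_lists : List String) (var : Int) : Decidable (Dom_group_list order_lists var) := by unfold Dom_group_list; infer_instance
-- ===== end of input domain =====

-- B replaces A's bucket array over all counts 0..var with nested scans by a single
-- dict-grouping pass over the input followed by a sort of the occurring one-counts.

-- ===== PORT A =====
def count_one (string : String) : Int :=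
  string.toList.foldl (fun count n => if n == '1' then count + 1 else count) 0

def group_list (order_lists : List String) (var : Int) : List (List String) :=
  let ones := var + 1
  let final_list : List (List String) :=
    (PySem.List.pyRange 0 ones 1).foldl (fun fl _ => fl ++ [([] : List String)]) []
  -- group like one's in each mini list; final_list[n].append(m) = in-place update at index n
  let final_list :=
    (PySem.List.pyRange 0 ones 1).foldl (fun fl n =>
      order_lists.foldl (fun fl m =>
        if count_one m = n then
          PySem.List.pySetD fl n (PySem.List.pyGetD fl n [] ++ [m])
        else fl) fl) final_list
  final_list.filter (fun n => n != [])

-- ===== PORT B =====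
-- buckets.setdefault(c, []).append(m) = Dict.modify c [] (· ++ [m]) (in-place append keeps key position)
def group_list_alt (order_lists : List String) (var : Int) : List (List String) :=
  let buckets : PySem.Dict Int (List String) :=
    order_lists.foldl (fun d m =>
      let c : Int := m.toList.foldl (fun acc ch => if ch == '1' then acc + 1 else acc) 0
      if c ≤ var then d.modify c [] (· ++ [m]) else d) PySem.Dict.empty
  (PySem.List.sorted buckets.keys (fun k => k)).map (fun c => buckets.getD c [])

-- ===== PRECONDITION & SPEC =====
def Spec_group_list (order_lists : List String) (var : Int) (out : List (List String)) : Prop := out = group_list_alt order_lists var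
instance (order_lists : List String) (var : Int) (out : List (List String)) : Decidable (Spec_group_list order_lists var out) := by unfold Spec_group_list; infer_instance

-- ===== CLAIM (what is proved, stated in full; the proofs are below) =====
def Claim_equal_group_list : Prop := ∀ (order_lists : List String) (var : Int), Dom_group_list order_lists var → Spec_group_list order_lists var (group_list order_lists var)

-- ===== LEMMAS AND PROOFS =====

-- count_one is a count of '1' characters, hence nonnegative
theorem count_one_eq_count (m : String) : count_one m = (m.toList.count '1' : Int) := by
  simpa [count_one] using PySem.List.foldl_beq_add_one m.toList '1' 0

theorem count_one_nonneg (m : String) : 0 ≤ count_one m := by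
  rw [count_one_eq_count]; positivity

-- the group of strings with exactly n ones
def grp (order_lists : List String) (n : Int) : List String :=
  order_lists.filter (fun m => count_one m == n)

-- A's inner loop appends the j-group to slot j (List.set form)
theorem inner_loop_set (ol : List String) (j : Nat) :
    ∀ (fl : List (List String)), j < fl.length →
    ol.foldl (fun fl m =>
        if count_one m = (j : Int) then fl.set j (fl.getD j [] ++ [m]) else fl) fl
      = fl.set j (fl.getD j [] ++ grp ol (j : Int)) := by
  induction ol with
  | nil =>
    intro fl hj
    simp only [List.foldl_nil, grp, List.filter_nil, List.append_nil]
    rw [List.getD_eq_getElem fl [] hj, List.set_getElem_self hj]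
  | cons m t ih =>
    intro fl hj
    by_cases hc : count_one m = (j : Int)
    · have hlen : j < (fl.set j (fl.getD j [] ++ [m])).length := by simpa using hj
      rw [List.foldl_cons, if_pos hc, ih _ hlen]
      have hget : (fl.set j (fl.getD j [] ++ [m])).getD j [] = fl.getD j [] ++ [m] := by
        rw [List.getD_eq_getElem _ [] hlen, List.getElem_set_self (by simpa using hj)]
      rw [hget, List.set_set]
      have : grp (m :: t) (j : Int) = m :: grp t (j : Int) := by
        simp [grp, hc]
      rw [this]
      simp
    · rw [List.foldl_cons, if_neg hc, ih _ hj]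
      have : grp (m :: t) (j : Int) = grp t (j : Int) := by
        simp [grp, hc]
      rw [this]

-- A's inner loop in its pySetD/pyGetD form
theorem inner_loop_eq (ol : List String) (j : Nat) (fl : List (List String)) (hj : j < fl.length) :
    ol.foldl (fun fl m =>
        if count_one m = (j : Int) then
          PySem.List.pySetD fl ((j : Int)) (PySem.List.pyGetD fl ((j : Int)) [] ++ [m])
        else fl) fl
      = fl.set j (fl.getD j [] ++ grp ol (j : Int)) := by
  have hb : (fun (fl : List (List String)) (m : String) =>
      if count_one m = (j : Int) then
        PySem.List.pySetD fl ((j : Int)) (PySem.List.pyGetD fl ((j : Int)) [] ++ [m])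
      else fl)
      = (fun (fl : List (List String)) (m : String) =>
        if count_one m = (j : Int) then fl.set j (fl.getD j [] ++ [m]) else fl) := by
    funext fl m
    rw [PySem.List.pySetD_natCast, PySem.List.pyGetD_natCast]
  rw [hb, inner_loop_set ol j fl hj]

-- A's outer loop fills slot j with the j-group
theorem outer_loop_eq (ol : List String) (N : Nat) :
    ∀ (k : Nat), k ≤ N →
    (List.range k).foldl (fun (fl : List (List String)) (j : Nat) =>
        ol.foldl (fun fl m =>
          if count_one m = (j : Int) then
            PySem.List.pySetD fl ((j : Int)) (PySem.List.pyGetD fl ((j : Int)) [] ++ [m])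
          else fl) fl) ((List.range N).map (fun _ => ([] : List String)))
      = (List.range N).map (fun j => if j < k then grp ol (j : Int) else []) := by
  intro k
  induction k with
  | zero => intro _; simp
  | succ k ih =>
    intro hk
    have hk' : k ≤ N := Nat.le_of_succ_le hk
    rw [List.range_succ, List.foldl_append, List.foldl_cons, List.foldl_nil, ih hk']
    have hlen : k < ((List.range N).map (fun j => if j < k then grp ol (j : Int) else [])).length := by
      simpa using hk
    rw [inner_loop_eq ol k _ hlen]
    have hget : ((List.range N).map (fun j => if j < k then grp ol (j : Int) else [])).getD k [] = [] := by
      rw [List.getD_eq_getElem _ [] hlen]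
      simp
    rw [hget]
    apply List.ext_getElem
    · simp
    · intro i h1 h2
      rcases Nat.lt_or_ge i k with hik | hik
      · rw [List.getElem_set_ne (by omega)]
        simp only [List.getElem_map, List.getElem_range]
        rw [if_pos hik, if_pos (by omega)]
      · rcases Nat.eq_or_lt_of_le hik with heq | hlt
        · subst heq
          rw [List.getElem_set_self (by simpa using h2)]
          simp only [List.getElem_map, List.getElem_range]
          rw [if_pos (by omega)]
          simp
        · rw [List.getElem_set_ne (by omega)]
          simp only [List.getElem_map, List.getElem_range]
          rw [if_neg (by omega), if_neg (by omega)]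

-- A in closed form (var ≥ 0, N = var + 1)
theorem A_closed (ol : List String) (var : Int) (N : Nat) (hN : var + 1 = (N : Int)) :
    group_list ol var
      = ((List.range N).filter (fun (j : Nat) => grp ol (j : Int) != [])).map (fun (j : Nat) => grp ol (j : Int)) := by
  simp only [group_list]
  rw [hN, PySem.List.pyRange_zero_nat, PySem.List.foldl_append_singleton_eq_map,
    List.foldl_map, List.nil_append, List.map_map]
  simp only [Function.comp_def]
  rw [outer_loop_eq ol N N le_rfl]
  have hmap : (List.range N).map (fun (j : Nat) => if j < N then grp ol (j : Int) else [])
      = (List.range N).map (fun (j : Nat) => grp ol (j : Int)) := by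
    apply List.map_congr_left
    intro j hj
    rw [if_pos (List.mem_range.mp hj)]
  rw [hmap, List.filter_map]
  simp only [Function.comp_def]

-- B's bucket fold over the list equals the pair-fold over the eligible pairs
theorem bucket_fold_eq (var : Int) (ol : List String) :
    ∀ (d : PySem.Dict Int (List String)),
    ol.foldl (fun d m =>
        let c : Int := m.toList.foldl (fun acc ch => if ch == '1' then acc + 1 else acc) 0
        if c ≤ var then d.modify c [] (· ++ [m]) else d) d
      = ((ol.filter (fun m => count_one m ≤ var)).map (fun m => (count_one m, m))).foldl
          (fun d p => d.modify p.1 [] (· ++ [p.2])) d := by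
  induction ol with
  | nil => intro d; rfl
  | cons m t ih =>
    intro d
    have hc : (m.toList.foldl (fun acc ch => if ch == '1' then acc + 1 else acc) 0) = count_one m := rfl
    by_cases h : count_one m ≤ var
    · have hf : List.filter (fun m => decide (count_one m ≤ var)) (m :: t)
          = m :: List.filter (fun m => decide (count_one m ≤ var)) t := by
        simp [h]
      simp only [List.foldl_cons, hc]
      rw [if_pos h, ih, hf, List.map_cons, List.foldl_cons]
    · have hf : List.filter (fun m => decide (count_one m ≤ var)) (m :: t)
          = List.filter (fun m => decide (count_one m ≤ var)) t := by
        simp [h]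
      simp only [List.foldl_cons, hc]
      rw [if_neg h, ih, hf]

-- B's bucket for key k ≤ var is exactly the k-group
theorem bucket_getD (ol : List String) (var : Int) (k : Int) (hk : k ≤ var) :
    (((ol.filter (fun m => count_one m ≤ var)).map (fun m => (count_one m, m))).foldl
        (fun d p => d.modify p.1 [] (· ++ [p.2])) (PySem.Dict.empty : PySem.Dict Int (List String))).getD k []
      = grp ol k := by
  rw [PySem.Dict.getD_foldl_modify_append]
  simp only [PySem.Dict.getD_empty, List.nil_append]
  rw [List.filter_map, List.map_map]
  have hcomp : ((fun (x : Int × String) => x.2) ∘ fun m => (count_one m, m)) = id := rfl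
  rw [hcomp, List.map_id, List.filter_filter]
  unfold grp
  apply List.filter_congr
  intro m _
  by_cases h : count_one m = k
  · simp [h, hk]
  · simp [h]

-- B's key list is the eligible one-counts, first occurrences in order
theorem bucket_keys (ol : List String) (var : Int) :
    (((ol.filter (fun m => count_one m ≤ var)).map (fun m => (count_one m, m))).foldl
        (fun d p => d.modify p.1 [] (· ++ [p.2])) (PySem.Dict.empty : PySem.Dict Int (List String))).keys
      = PySem.Set.ofList ((ol.filter (fun m => count_one m ≤ var)).map count_one) := by
  have h := PySem.Dict.keys_foldl_modify_key
      ((ol.filter (fun m => count_one m ≤ var)).map (fun m => (count_one m, m)))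
      (fun p : Int × String => p.1) ([] : List String) (fun _ p => (· ++ [p.2])) PySem.Dict.empty
  simp only [PySem.Dict.keys_empty, PySem.Set.update_nil_left, List.map_map] at h
  exact h

-- the sorted key list is the ascending list of inhabited eligible counts
theorem sorted_keys_eq (ol : List String) (var : Int) (N : Nat) (hN : var + 1 = (N : Int)) :
    PySem.List.sorted (PySem.Set.ofList ((ol.filter (fun m => count_one m ≤ var)).map count_one))
        (fun k => k)
      = ((List.range N).filter (fun (j : Nat) => grp ol (j : Int) != [])).map (fun (j : Nat) => (j : Int)) := by
  apply PySem.List.sorted_eq_of_perm_of_pairwise_lt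
  · rw [List.perm_ext_iff_of_nodup]
    · intro k
      simp only [List.mem_map, List.mem_filter, List.mem_range, PySem.Set.mem_ofList,
        bne_iff_ne, ne_eq, decide_eq_true_eq]
      constructor
      · rintro ⟨j, ⟨hjN, hne⟩, rfl⟩
        rcases List.exists_mem_of_ne_nil _ hne with ⟨m, hm⟩
        unfold grp at hm
        rw [List.mem_filter, beq_iff_eq] at hm
        exact ⟨m, ⟨hm.1, by rw [hm.2]; omega⟩, hm.2⟩
      · rintro ⟨m, ⟨hmem, hle⟩, rfl⟩
        refine ⟨(count_one m).toNat, ⟨by have := count_one_nonneg m; omega, ?_⟩,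
          by have := count_one_nonneg m; omega⟩
        intro hnil
        have hm : m ∈ grp ol (((count_one m).toNat : Nat) : Int) := by
          unfold grp
          rw [List.mem_filter, beq_iff_eq]
          exact ⟨hmem, by have := count_one_nonneg m; omega⟩
        rw [hnil] at hm
        exact absurd hm (List.not_mem_nil)
    · refine List.Nodup.map (fun a b hab => by exact_mod_cast hab)
        (List.Nodup.filter _ List.nodup_range)
    · exact PySem.Set.nodup_ofList _
  · refine List.Pairwise.map _ (fun a b hab => by exact_mod_cast hab) ?_
    exact List.Pairwise.filter _ List.pairwise_lt_range

-- B in closed form (var ≥ 0, N = var + 1)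
theorem B_closed (ol : List String) (var : Int) (N : Nat) (hN : var + 1 = (N : Int)) :
    group_list_alt ol var
      = ((List.range N).filter (fun (j : Nat) => grp ol (j : Int) != [])).map (fun (j : Nat) => grp ol (j : Int)) := by
  simp only [group_list_alt]
  rw [bucket_fold_eq var ol PySem.Dict.empty, bucket_keys, sorted_keys_eq ol var N hN,
    List.map_map]
  apply List.map_congr_left
  intro j hj
  rw [List.mem_filter, List.mem_range] at hj
  have hle : (j : Int) ≤ var := by omega
  exact bucket_getD ol var (j : Int) hle

-- the var < 0 case: A builds no buckets, B admits no element (counts are ≥ 0)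
theorem neg_case (ol : List String) (var : Int) (h : var < 0) :
    group_list ol var = group_list_alt ol var := by
  have hr : PySem.List.pyRange 0 (var + 1) 1 = [] := PySem.List.pyRange_one_eq_nil (by omega)
  have hfilter : ol.filter (fun m => count_one m ≤ var) = [] := by
    rw [List.filter_eq_nil_iff]
    intro m _
    have := count_one_nonneg m
    simp only [decide_eq_true_eq]
    omega
  simp only [group_list, group_list_alt]
  rw [bucket_fold_eq var ol PySem.Dict.empty, hfilter, hr]
  rfl

-- ===== VERDICT (by name: the statement is the Claim_ definition above) =====
theorem group_list_spec : Claim_equal_group_list := by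
  intro ol var _
  unfold Spec_group_list
  rcases lt_or_ge var 0 with h | h
  · exact neg_case ol var h
  · rw [A_closed ol var (var + 1).toNat (by omega), B_closed ol var (var + 1).toNat (by omega)]
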